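-- pv_equiv track=rewrite | github.com/lmuffato/Project-algorithms-Trybe | challenges/challenge_anagrams.py | convert_letter_to_prime
-- ===== SOURCE A (Python) =====
-- from string import ascii_lowercase as letters
--
-- def get_num_prime(num):
--     if num:
--         return num**2 + num + 42
--
-- def convert_letter_to_prime(letter):
--     primes_nums = []
--     num = 0
--
--     for index in range(0, len(letters)):
--         for char in letter:
--             if char == letters[index]:
--                 num = get_num_prime(index)
--                 primes_nums.append(num)
--     return primes_nums
-- ===== SOURCE B (Python) =====
-- from string import ascii_lowercase as letters
--
--
-- def convert_letter_to_prime(letter):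
--     counts = {}
--     for ch in letter:
--         if 'a' <= ch <= 'z':
--             counts[ch] = counts.get(ch, 0) + 1
--     out = []
--     for index, ch in enumerate(letters):
--         val = index ** 2 + index + 42 if index else None
--         out += [val] * counts.get(ch, 0)
--     return out
-- ===== Notes on version B (the rewrite author's own statement) =====
-- stated objective: faster
-- what changed: Replaces A's 26 full scans of the word (alphabet x word nested loops) by a single counting pass over the word into a dict plus one emit pass over the 26 alphabet letters that extends the output with [value]*count.
import Mathlib
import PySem

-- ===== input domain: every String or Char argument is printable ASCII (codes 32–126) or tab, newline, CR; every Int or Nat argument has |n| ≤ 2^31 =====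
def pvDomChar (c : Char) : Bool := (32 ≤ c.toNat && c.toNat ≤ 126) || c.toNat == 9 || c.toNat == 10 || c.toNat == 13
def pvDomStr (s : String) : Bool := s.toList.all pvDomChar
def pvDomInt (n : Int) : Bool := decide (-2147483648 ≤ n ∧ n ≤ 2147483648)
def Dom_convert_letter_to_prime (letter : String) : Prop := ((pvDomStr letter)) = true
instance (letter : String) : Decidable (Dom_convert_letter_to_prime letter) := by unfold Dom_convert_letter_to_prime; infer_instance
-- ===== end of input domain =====

-- B replaces A's 26×n nested scans by one counting pass over the word plus one emit pass
-- over the alphabet (same return value; a timing run measured B faster).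

-- module constant: from string import ascii_lowercase as letters
def pyLetters : String := "abcdefghijklmnopqrstuvwxyz"

-- ===== PORT A =====
def get_num_prime (num : Int) : Option Int :=
  if num ≠ 0 then some (num ^ 2 + num + 42) else none

def convert_letter_to_prime (letter : String) : List (Option Int) :=
  ((PySem.List.pyRange 0 (PySem.Str.len pyLetters) 1).foldl
    (fun (st : List (Option Int) × Option Int) index =>
      letter.toList.foldl
        (fun st char =>
          if some char == PySem.List.pyGet? pyLetters.toList index then
            let num := get_num_prime index
            (st.1 ++ [num], num)
          else st)
        st)
    ([], some 0)).1

-- ===== PORT B =====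
def convert_letter_to_prime_alt (letter : String) : List (Option Int) :=
  let counts : PySem.Dict Char Int :=
    letter.toList.foldl
      (fun d ch => if 'a' ≤ ch ∧ ch ≤ 'z' then d.insert ch (d.getD ch 0 + 1) else d)
      PySem.Dict.empty
  (PySem.List.enumerate pyLetters.toList).foldl
    (fun out p =>
      let val : Option Int := if p.1 ≠ 0 then some (p.1 ^ 2 + p.1 + 42) else none
      out ++ List.replicate (counts.getD p.2 0).toNat val)
    []

-- ===== PRECONDITION & SPEC =====
def Spec_convert_letter_to_prime (letter : String) (out : List (Option Int)) : Prop := out = convert_letter_to_prime_alt letter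
instance (letter : String) (out : List (Option Int)) : Decidable (Spec_convert_letter_to_prime letter out) := by unfold Spec_convert_letter_to_prime; infer_instance

-- ===== CLAIM (what is proved, stated in full; the proofs are below) =====
def Claim_equal_convert_letter_to_prime : Prop := ∀ (letter : String), Dom_convert_letter_to_prime letter → Spec_convert_letter_to_prime letter (convert_letter_to_prime letter)

-- ===== LEMMAS AND PROOFS =====

-- A's inner loop over the word, for one fixed alphabet letter c with value v:
-- it appends v once per occurrence of c, and num ends as v iff there was a match.
theorem pvInnerA (c : Char) (v : Option Int) :
    ∀ (chars : List Char) (acc : List (Option Int)) (num : Option Int),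
      (chars.foldl (fun st char => if some char == some c then (st.1 ++ [v], v) else st) (acc, num))
        = (acc ++ List.replicate (chars.count c) v, if chars.count c = 0 then num else v) := by
  intro chars
  induction chars with
  | nil => intro acc num; simp
  | cons x xs ih =>
    intro acc num
    by_cases hx : x = c
    · subst hx
      rw [List.foldl_cons, if_pos (by simp), ih]
      simp [List.replicate_succ, List.append_assoc]
    · rw [List.foldl_cons, if_neg (by simp [hx]), ih, List.count_cons_of_ne hx]

-- A's outer loop, abstracted over the index list, once each letters[index] is known.
theorem pvOuterA (L : List Char) (f : Int → Char) :
    ∀ (idxs : List Int), (∀ i ∈ idxs, PySem.List.pyGet? pyLetters.toList i = some (f i)) →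
    ∀ (acc : List (Option Int)) (num : Option Int),
      ((idxs.foldl
          (fun (st : List (Option Int) × Option Int) index =>
            L.foldl
              (fun st char =>
                if some char == PySem.List.pyGet? pyLetters.toList index then
                  let num := get_num_prime index
                  (st.1 ++ [num], num)
                else st)
              st)
          (acc, num)).1)
        = idxs.foldl (fun out i => out ++ List.replicate (L.count (f i)) (get_num_prime i)) acc := by
  intro idxs
  induction idxs with
  | nil => intro _ acc num; simp
  | cons i is ih =>
    intro h acc num
    have hi := h i (List.mem_cons_self ..)
    simp only [List.foldl_cons, hi, pvInnerA]
    exact ih (fun j hj => h j (List.mem_cons_of_mem _ hj)) _ _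

-- B's guarded counting pass = the same pass over the word filtered to lowercase letters
theorem pvCountFold :
    ∀ (xs : List Char) (d : PySem.Dict Char Int),
      xs.foldl (fun d ch => if 'a' ≤ ch ∧ ch ≤ 'z' then d.insert ch (d.getD ch 0 + 1) else d) d
        = (xs.filter (fun ch => decide ('a' ≤ ch ∧ ch ≤ 'z'))).foldl
            (fun d ch => d.insert ch (d.getD ch 0 + 1)) d := by
  intro xs
  induction xs with
  | nil => intro d; simp
  | cons x xs ih =>
    intro d
    by_cases hx : ('a' ≤ x ∧ x ≤ 'z') <;> simp [hx, ih]

theorem pvRangeChars :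
    ∀ i ∈ PySem.List.pyRange 0 26 1,
      PySem.List.pyGet? pyLetters.toList i = some (Char.ofNat (97 + i.toNat)) := by
  decide

theorem pvEnumLetters :
    PySem.List.enumerate pyLetters.toList
      = (PySem.List.pyRange 0 26 1).map (fun i => (i, Char.ofNat (97 + i.toNat))) := by
  decide

theorem pvLower (i : Int) (h0 : 0 ≤ i) (h26 : i < 26) :
    ('a' ≤ Char.ofNat (97 + i.toNat) ∧ Char.ofNat (97 + i.toNat) ≤ 'z') := by
  interval_cases i <;> decide

-- ===== VERDICT (by name: the statement is the Claim_ definition above) =====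
theorem convert_letter_to_prime_spec : Claim_equal_convert_letter_to_prime := by
  intro letter _
  unfold Spec_convert_letter_to_prime convert_letter_to_prime convert_letter_to_prime_alt
  have hlen : PySem.Str.len pyLetters = 26 := by decide
  rw [hlen, pvOuterA letter.toList (fun i => Char.ofNat (97 + i.toNat)) _ pvRangeChars]
  have hcount : ∀ c : Char,
      (letter.toList.foldl
        (fun d ch => if 'a' ≤ ch ∧ ch ≤ 'z' then d.insert ch (d.getD ch 0 + 1) else d)
        PySem.Dict.empty).getD c 0
      = ((letter.toList.filter (fun ch => decide ('a' ≤ ch ∧ ch ≤ 'z'))).count c : Int) := by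
    intro c
    rw [pvCountFold, PySem.Dict.getD_foldl_insert_add_one]
    simp [PySem.Dict.getD_empty]
  simp only [hcount, pvEnumLetters, List.foldl_map]
  apply PySem.List.foldl_congr_mem
  intro out i hi
  have hmem := (PySem.List.mem_pyRange_one.mp hi)
  have hlow := pvLower i hmem.1 hmem.2
  rw [List.count_filter (by simpa using hlow)]
  simp [get_num_prime]
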